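-- pv_equiv track=rewrite | github.com/lwamuhaji/leetcode | 프로그래머스/lv0/120956. 옹알이 （1）/옹알이 （1）.py | solution
-- ===== SOURCE A (Python) =====
-- def solution(babbling):
--     answer = 0
--     for word in babbling:
--         while word:
--             if word.startswith("aya"):
--                 word = word[3:]
--             elif word.startswith("ye"):
--                 word = word[2:]
--             elif word.startswith("woo"):
--                 word = word[3:]
--             elif word.startswith("ma"):
--                 word = word[2:]
--             else:
--                 break
--         if word == "":
--             answer += 1
--     return answer
-- ===== SOURCE B (Python) =====
-- def solution(babbling):
--     # DFA over characters: state 0 = between syllables (accepting),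
--     # 1,2 inside "aya"; 3 inside "ye"; 4,5 inside "woo"; 6 inside "ma"; -1 dead.
--     def step(state, c):
--         if state == 0:
--             if c == 'a': return 1
--             if c == 'y': return 3
--             if c == 'w': return 4
--             if c == 'm': return 6
--         elif state == 1:
--             if c == 'y': return 2
--         elif state == 2:
--             if c == 'a': return 0
--         elif state == 3:
--             if c == 'e': return 0
--         elif state == 4:
--             if c == 'o': return 5
--         elif state == 5:
--             if c == 'o': return 0
--         elif state == 6:
--             if c == 'a': return 0
--         return -1
--     count = 0
--     for word in babbling:
--         state = 0
--         for c in word: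
--             state = step(state, c)
--         if state == 0:
--             count += 1
--     return count
-- ===== Notes on version B (the rewrite author's own statement) =====
-- stated objective: alternative
-- what changed: Replaced the greedy prefix-stripping while-loop with a deterministic finite automaton that scans each word character by character and accepts iff it ends between syllables.
import Mathlib
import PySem

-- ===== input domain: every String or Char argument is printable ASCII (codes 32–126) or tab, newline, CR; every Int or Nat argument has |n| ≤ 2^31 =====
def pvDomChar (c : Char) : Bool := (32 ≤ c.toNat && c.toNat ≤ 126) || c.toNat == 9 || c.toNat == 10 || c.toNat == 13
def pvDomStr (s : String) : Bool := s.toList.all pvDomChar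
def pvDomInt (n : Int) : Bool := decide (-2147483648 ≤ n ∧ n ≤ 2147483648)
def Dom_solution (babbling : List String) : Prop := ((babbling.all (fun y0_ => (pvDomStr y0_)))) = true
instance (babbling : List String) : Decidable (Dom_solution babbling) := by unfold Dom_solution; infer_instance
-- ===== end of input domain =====

-- B replaces A's greedy prefix-stripping loop with a character-by-character DFA scan (alternative algorithm, same cost).

-- ===== PORT A =====
-- A's inner while-loop: strip a leading syllable and repeat; break (return w) when none matches.
-- word.startswith("x") → PySem.Chars.startswith, word[k:] → List.drop k (exact for a nonneg literal index)
def stripLoop (w : List Char) : List Char :=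
  if _hw : w = [] then w
  else if PySem.Chars.startswith w ['a','y','a'] then stripLoop (w.drop 3)
  else if PySem.Chars.startswith w ['y','e'] then stripLoop (w.drop 2)
  else if PySem.Chars.startswith w ['w','o','o'] then stripLoop (w.drop 3)
  else if PySem.Chars.startswith w ['m','a'] then stripLoop (w.drop 2)
  else w
termination_by w.length
decreasing_by
  all_goals cases w with
  | nil => exact absurd rfl _hw
  | cons c r => simp only [List.length_drop, List.length_cons]; omega

def solution (babbling : List String) : Int :=
  babbling.foldl (fun answer word =>
    if stripLoop word.toList = [] then answer + 1 else answer) 0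

-- ===== PORT B =====
-- DFA transition of Source B: state 0 accepting/start, 1,2 inside "aya", 3 inside "ye", 4,5 inside "woo", 6 inside "ma", -1 dead
def pvStep (state : Int) (c : Char) : Int :=
  if state = 0 then
    (if c = 'a' then 1 else if c = 'y' then 3 else if c = 'w' then 4 else if c = 'm' then 6 else -1)
  else if state = 1 then (if c = 'y' then 2 else -1)
  else if state = 2 then (if c = 'a' then 0 else -1)
  else if state = 3 then (if c = 'e' then 0 else -1)
  else if state = 4 then (if c = 'o' then 5 else -1)
  else if state = 5 then (if c = 'o' then 0 else -1)
  else if state = 6 then (if c = 'a' then 0 else -1)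
  else -1

def solution_alt (babbling : List String) : Int :=
  babbling.foldl (fun count word =>
    if word.toList.foldl pvStep 0 = 0 then count + 1 else count) 0

-- ===== PRECONDITION & SPEC =====
def Spec_solution (babbling : List String) (out : Int) : Prop := out = solution_alt babbling
instance (babbling : List String) (out : Int) : Decidable (Spec_solution babbling out) := by unfold Spec_solution; infer_instance

-- ===== CLAIM (what is proved, stated in full; the proofs are below) =====
def Claim_equal_solution : Prop := ∀ (babbling : List String), Dom_solution babbling → Spec_solution babbling (solution babbling)

-- ===== LEMMAS AND PROOFS =====

-- the dead state is absorbing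
theorem run_sink (r : List Char) : List.foldl pvStep (-1) r = -1 := by
  induction r with
  | nil => rfl
  | cons c t ih => simpa [pvStep] using ih

-- per word: A's greedy stripping empties the word iff B's DFA run ends in the accepting state
theorem key (w : List Char) : (stripLoop w = []) ↔ (List.foldl pvStep 0 w = 0) := by
  generalize hn : w.length = n
  induction n using Nat.strong_induction_on generalizing w with
  | _ n ih =>
    rcases w with _ | ⟨c, r⟩
    · rw [stripLoop]; simp
    · by_cases hca : c = 'a'
      · subst hca
        rcases r with _ | ⟨c2, r2⟩
        · rw [stripLoop]; simp [PySem.Chars.startswith, List.isPrefixOf, pvStep]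
        · by_cases h2 : c2 = 'y'
          · subst h2
            rcases r2 with _ | ⟨c3, r3⟩
            · rw [stripLoop]; simp [PySem.Chars.startswith, List.isPrefixOf, pvStep]
            · by_cases h3 : c3 = 'a'
              · subst h3
                rw [stripLoop]
                simp only [List.length_cons] at hn
                simp [PySem.Chars.startswith, pvStep,
                      ih (n - 3) (by omega) r3 (by omega)]
              · rw [stripLoop]
                simp [PySem.Chars.startswith, List.isPrefixOf, Ne.symm h3, pvStep, h3, run_sink]
          · rw [stripLoop]
            simp [PySem.Chars.startswith, List.isPrefixOf, Ne.symm h2, pvStep, h2, run_sink]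
      · by_cases hcy : c = 'y'
        · subst hcy
          rcases r with _ | ⟨c2, r2⟩
          · rw [stripLoop]; simp [PySem.Chars.startswith, List.isPrefixOf, pvStep]
          · by_cases h2 : c2 = 'e'
            · subst h2
              rw [stripLoop]
              simp only [List.length_cons] at hn
              simp [PySem.Chars.startswith, pvStep,
                    ih (n - 2) (by omega) r2 (by omega)]
            · rw [stripLoop]
              simp [PySem.Chars.startswith, List.isPrefixOf, Ne.symm h2, pvStep, h2, run_sink]
        · by_cases hcw : c = 'w'
          · subst hcw
            rcases r with _ | ⟨c2, r2⟩
            · rw [stripLoop]; simp [PySem.Chars.startswith, List.isPrefixOf, pvStep]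
            · by_cases h2 : c2 = 'o'
              · subst h2
                rcases r2 with _ | ⟨c3, r3⟩
                · rw [stripLoop]; simp [PySem.Chars.startswith, List.isPrefixOf, pvStep]
                · by_cases h3 : c3 = 'o'
                  · subst h3
                    rw [stripLoop]
                    simp only [List.length_cons] at hn
                    simp [PySem.Chars.startswith, pvStep,
                          ih (n - 3) (by omega) r3 (by omega)]
                  · rw [stripLoop]
                    simp [PySem.Chars.startswith, List.isPrefixOf, Ne.symm h3, pvStep, h3, run_sink]
              · rw [stripLoop]
                simp [PySem.Chars.startswith, List.isPrefixOf, Ne.symm h2, pvStep, h2, run_sink]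
          · by_cases hcm : c = 'm'
            · subst hcm
              rcases r with _ | ⟨c2, r2⟩
              · rw [stripLoop]; simp [PySem.Chars.startswith, List.isPrefixOf, pvStep]
              · by_cases h2 : c2 = 'a'
                · subst h2
                  rw [stripLoop]
                  simp only [List.length_cons] at hn
                  simp [PySem.Chars.startswith, pvStep,
                        ih (n - 2) (by omega) r2 (by omega)]
                · rw [stripLoop]
                  simp [PySem.Chars.startswith, List.isPrefixOf, Ne.symm h2, pvStep, h2, run_sink]
            · rw [stripLoop]
              simp [PySem.Chars.startswith, List.isPrefixOf, hca, hcy, hcw, hcm, Ne.symm hca, Ne.symm hcy, Ne.symm hcw, Ne.symm hcm, pvStep, run_sink]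

-- ===== VERDICT (by name: the statement is the Claim_ definition above) =====
theorem solution_spec : Claim_equal_solution := by
  intro babbling _
  unfold Spec_solution solution solution_alt
  induction babbling using List.reverseRecOn with
  | nil => rfl
  | append_singleton l w ih => simp [List.foldl_append, key]
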